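-- pv_equiv track=rewrite | github.com/askhari139/nTeamsProject | fig1_2_code/Fig2S1F1FrustVsDenHyb.py | single_pos_gen
-- ===== SOURCE A (Python) =====
-- def single_pos_gen(nteams,team_indices,n):
--     output=[]
--     #n=number of nodes
--     for i in range(nteams):
--         state=[]
--         for j in range(0,n):
--             if j>=team_indices[i] and j<team_indices[i+1]:
--                 state.append(1)
--             else:
--                 state.append(-1)
--         output.append(state)
--     return(output)
-- ===== SOURCE B (Python) =====
-- def single_pos_gen(nteams, team_indices, n):
--     def row(a, b):
--         lo = min(max(a, 0), n)
--         hi = max(lo, min(b, n))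
--         return [-1] * lo + [1] * (hi - lo) + [-1] * (n - hi)
--     return [row(team_indices[i], team_indices[i + 1]) for i in range(nteams)]
-- ===== Notes on version B (the rewrite author's own statement) =====
-- stated objective: simpler
-- what changed: B builds each per-team state vector directly as three homogeneous runs [-1]*lo + [1]*(hi-lo) + [-1]*(n-hi) from clamped boundaries instead of A's inner per-element loop testing each j against both boundaries.
-- outside the precondition, e.g. on single_pos_gen(1, [], -2): A returns [[]], B raises IndexError; on single_pos_gen(1, [5], 3): A returns [[-1, -1, -1]], B raises IndexError
import Mathlib
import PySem

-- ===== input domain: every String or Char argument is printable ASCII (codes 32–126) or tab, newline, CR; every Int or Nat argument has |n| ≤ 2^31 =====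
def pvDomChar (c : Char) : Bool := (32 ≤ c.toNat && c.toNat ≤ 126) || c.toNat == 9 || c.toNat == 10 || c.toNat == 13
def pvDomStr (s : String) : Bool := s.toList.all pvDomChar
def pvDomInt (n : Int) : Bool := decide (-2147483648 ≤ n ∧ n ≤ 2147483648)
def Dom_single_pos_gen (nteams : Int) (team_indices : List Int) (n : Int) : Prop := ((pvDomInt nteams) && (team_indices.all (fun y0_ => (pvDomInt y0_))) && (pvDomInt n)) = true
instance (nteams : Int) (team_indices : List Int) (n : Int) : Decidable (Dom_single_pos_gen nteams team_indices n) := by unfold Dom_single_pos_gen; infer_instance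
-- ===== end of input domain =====

-- B builds each team's ±1 state vector as three homogeneous runs from clamped
-- boundaries instead of A's per-element boundary test (objective: simpler).

-- ===== PORT A =====
-- literal transliteration of A: outer loop over teams, inner loop over nodes
-- appending 1 inside the [team_indices[i], team_indices[i+1]) window, -1 outside.
-- (pyGetD _ _ 0 is exact on Pre_, where every index used is in range.)
def single_pos_gen (nteams : Int) (team_indices : List Int) (n : Int) : List (List Int) :=
  (PySem.List.pyRange 0 nteams 1).foldl (fun output i =>
    output ++ [ (PySem.List.pyRange 0 n 1).foldl (fun state j =>
      state ++ [ if PySem.List.pyGetD team_indices i 0 ≤ j ∧ j < PySem.List.pyGetD team_indices (i + 1) 0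
                 then (1 : Int) else -1 ]) ([] : List Int) ]) []

-- ===== PORT B =====
-- Source B's row helper: [-1]*lo + [1]*(hi-lo) + [-1]*(n-hi) (Python list-repeat clamps
-- a negative count to 0, exactly List.replicate ∘ Int.toNat).
def pvRow (n a b : Int) : List Int :=
  let lo := min (max a 0) n
  let hi := max lo (min b n)
  List.replicate lo.toNat (-1) ++ List.replicate (hi - lo).toNat 1 ++ List.replicate (n - hi).toNat (-1)

def single_pos_gen_alt (nteams : Int) (team_indices : List Int) (n : Int) : List (List Int) :=
  (PySem.List.pyRange 0 nteams 1).map (fun i =>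
    pvRow n (PySem.List.pyGetD team_indices i 0) (PySem.List.pyGetD team_indices (i + 1) 0))

-- ===== PRECONDITION & SPEC =====
-- Pre_ excludes calls with fewer than nteams+1 boundary entries: B always reads both
-- boundaries of every team and raises IndexError there, while A can still return a value
-- only when short-circuiting (n <= 0, or the first boundary exceeding every j) keeps the
-- missing entry from ever being read.
def Pre_single_pos_gen (nteams : Int) (team_indices : List Int) (n : Int) : Prop :=
  nteams ≤ 0 ∨ nteams + 1 ≤ (team_indices.length : Int)
instance (nteams : Int) (team_indices : List Int) (n : Int) : Decidable (Pre_single_pos_gen nteams team_indices n) := by unfold Pre_single_pos_gen; infer_instance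
def pvWitness_single_pos_gen : Int × List Int × Int := (2, [0, 2, 5], 5)

def Spec_single_pos_gen (nteams : Int) (team_indices : List Int) (n : Int) (out : List (List Int)) : Prop := out = single_pos_gen_alt nteams team_indices n
instance (nteams : Int) (team_indices : List Int) (n : Int) (out : List (List Int)) : Decidable (Spec_single_pos_gen nteams team_indices n out) := by unfold Spec_single_pos_gen; infer_instance

-- ===== CLAIM (what is proved, stated in full; the proofs are below) =====
def Claim_equal_single_pos_gen : Prop := ∀ (nteams : Int) (team_indices : List Int) (n : Int), Dom_single_pos_gen nteams team_indices n → Pre_single_pos_gen nteams team_indices n → Spec_single_pos_gen nteams team_indices n (single_pos_gen nteams team_indices n)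

-- ===== LEMMAS AND PROOFS =====

-- element of [x]*p ++ [y]*q ++ [x]*r
theorem pvGetElem_rep3 (p q r : Nat) (x y : Int) (k : Nat) (hk : k < p + q + r) :
    (List.replicate p x ++ List.replicate q y ++ List.replicate r x)[k]'(by simp; omega)
      = if p ≤ k ∧ k < p + q then y else x := by
  by_cases h1 : k < p + q
  · rw [List.getElem_append_left (by simp; omega)]
    by_cases h2 : k < p
    · rw [List.getElem_append_left (by simp; omega)]
      simp only [List.getElem_replicate]
      rw [if_neg (by omega)]
    · rw [List.getElem_append_right (by simp; omega)]
      simp only [List.getElem_replicate, List.length_replicate]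
      rw [if_pos (by omega)]
  · rw [List.getElem_append_right (by simp; omega)]
    simp only [List.getElem_replicate, List.length_replicate]
    rw [if_neg (by omega)]

-- the inner per-element loop of A, already turned into a map, equals B's row
theorem pvRow_eq (n a b : Int) :
    (PySem.List.pyRange 0 n 1).map (fun j => if a ≤ j ∧ j < b then (1 : Int) else -1)
      = pvRow n a b := by
  unfold pvRow
  apply List.ext_getElem
  · simp [PySem.List.length_pyRange_one]
    omega
  · intro k hk1 hk2
    have hkn : k < n.toNat := by
      simpa [PySem.List.length_pyRange_one] using hk1
    rw [List.getElem_map, PySem.List.getElem_pyRange_one,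
        pvGetElem_rep3 _ _ _ _ _ k (by omega)]
    simp only [zero_add]
    split_ifs <;> omega

theorem single_pos_gen_eq_alt (nteams : Int) (team_indices : List Int) (n : Int) :
    single_pos_gen nteams team_indices n = single_pos_gen_alt nteams team_indices n := by
  unfold single_pos_gen single_pos_gen_alt
  rw [PySem.List.foldl_append_singleton_eq_map, List.nil_append]
  apply List.map_congr_left
  intro i _
  rw [PySem.List.foldl_append_singleton_eq_map, List.nil_append]
  exact pvRow_eq n _ _

-- ===== VERDICT (by name: the statement is the Claim_ definition above) =====
theorem single_pos_gen_spec : Claim_equal_single_pos_gen := by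
  intro nteams team_indices n _ _
  exact single_pos_gen_eq_alt nteams team_indices n
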